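-- pv_equiv track=rewrite | github.com/SharifG23o/LOGICA | MONITOR LÓGICA/PRAX-2-´PARCIAL2.py | generar_figura
-- ===== SOURCE A (Python) =====
-- def generar_figura(lado):
--     figura = ""
--     for i in range(1, lado + 1):
--         if i == 1 or i == lado:
--             figura += "*" * lado + "\n"
--         else:
--
--             figura += "*" + " " * (lado - 2) + "*\n"
--     return figura
-- ===== SOURCE B (Python) =====
-- def generar_figura(lado):
--     if lado <= 0:
--         return ""
--     border = '*' * lado
--     if lado == 1:
--         rows = [border]
--     else:
--         middle = '*' + ' ' * (lado - 2) + '*'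
--         rows = [border] + [middle] * (lado - 2) + [border]
--     return '\n'.join(rows) + '\n'
-- ===== Notes on version B (the rewrite author's own statement) =====
-- stated objective: alternative
-- what changed: B replaces A's row loop with branch and string concatenation by a loop-free construction: build the border and middle row strings once, form the row list as [border] + [middle]*(lado-2) + [border], and join it with newlines.
import Mathlib
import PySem

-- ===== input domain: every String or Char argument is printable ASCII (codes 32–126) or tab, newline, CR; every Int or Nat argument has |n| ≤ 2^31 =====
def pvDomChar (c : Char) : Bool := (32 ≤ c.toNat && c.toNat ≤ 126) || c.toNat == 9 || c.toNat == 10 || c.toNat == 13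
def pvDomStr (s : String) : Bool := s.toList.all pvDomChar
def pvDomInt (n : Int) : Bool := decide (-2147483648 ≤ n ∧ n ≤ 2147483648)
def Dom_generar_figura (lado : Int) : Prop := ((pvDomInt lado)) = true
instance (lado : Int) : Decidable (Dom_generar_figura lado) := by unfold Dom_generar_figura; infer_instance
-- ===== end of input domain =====

-- B replaces A's row loop (branch + string concatenation per row) by a loop-free row list
-- [border] + [middle]*(lado-2) + [border] joined with newlines (objective: alternative).

-- ===== PORT A =====
-- strings are handled as List Char (PySem convention) and packed with String.ofList at the end
def generar_figura (lado : Int) : String :=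
  String.ofList ((PySem.List.pyRange 1 (lado + 1) 1).foldl
    (fun figura i =>
      if i = 1 ∨ i = lado then
        figura ++ (PySem.List.pyRepeat ['*'] lado ++ ['\n'])
      else
        figura ++ (['*'] ++ PySem.List.pyRepeat [' '] (lado - 2) ++ ['*', '\n'])) [])

-- ===== PORT B =====
def generar_figura_alt (lado : Int) : String :=
  if lado ≤ 0 then ""
  else
    let border := PySem.List.pyRepeat ['*'] lado
    let rows :=
      if lado = 1 then [border]
      else [border]
        ++ PySem.List.pyRepeat [['*'] ++ PySem.List.pyRepeat [' '] (lado - 2) ++ ['*']] (lado - 2)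
        ++ [border]
    String.ofList (PySem.Chars.join ['\n'] rows ++ ['\n'])

-- ===== PRECONDITION & SPEC =====
def Spec_generar_figura (lado : Int) (out : String) : Prop := out = generar_figura_alt lado
instance (lado : Int) (out : String) : Decidable (Spec_generar_figura lado out) := by unfold Spec_generar_figura; infer_instance

-- ===== CLAIM (what is proved, stated in full; the proofs are below) =====
def Claim_equal_generar_figura : Prop := ∀ (lado : Int), Dom_generar_figura lado → Spec_generar_figura lado (generar_figura lado)

-- ===== LEMMAS AND PROOFS =====

-- A's row string for row index i (1-based)
def pvRowA (lado i : Int) : List Char :=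
  if i = 1 ∨ i = lado then PySem.List.pyRepeat ['*'] lado ++ ['\n']
  else ['*'] ++ PySem.List.pyRepeat [' '] (lado - 2) ++ ['*', '\n']

lemma pvFoldA (lado : Int) :
    (PySem.List.pyRange 1 (lado + 1) 1).foldl
      (fun figura i =>
        if i = 1 ∨ i = lado then
          figura ++ (PySem.List.pyRepeat ['*'] lado ++ ['\n'])
        else
          figura ++ (['*'] ++ PySem.List.pyRepeat [' '] (lado - 2) ++ ['*', '\n'])) []
    = (PySem.List.pyRange 1 (lado + 1) 1).flatMap (pvRowA lado) := by
  rw [show (fun (figura : List Char) (i : Int) =>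
        if i = 1 ∨ i = lado then
          figura ++ (PySem.List.pyRepeat ['*'] lado ++ ['\n'])
        else
          figura ++ (['*'] ++ PySem.List.pyRepeat [' '] (lado - 2) ++ ['*', '\n']))
      = (fun figura i => figura ++ pvRowA lado i) from by
    funext a b; unfold pvRowA; split_ifs <;> simp]
  rw [PySem.List.foldl_append_eq_flatMap]
  simp

-- a length-n list whose first and last entries are x and whose interior is y
lemma pvBorderMap {α : Type} (n : ℕ) (hn : 2 ≤ n) (x y : α) :
    (List.range n).map (fun c => if c = 0 ∨ c = n - 1 then x else y)
    = [x] ++ List.replicate (n - 2) y ++ [x] := by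
  obtain ⟨m, rfl⟩ : ∃ m, n = m + 2 := ⟨n - 2, by omega⟩
  rw [show m + 2 = (m + 1) + 1 from rfl, List.range_succ, List.range_succ_eq_map]
  simp only [List.map_append, List.map_cons, List.map_map, List.map_nil]
  rw [if_pos (show True ∨ (0 : ℕ) = m + 1 + 1 - 1 from Or.inl trivial),
      if_pos (show m + 1 = 0 ∨ m + 1 = m + 1 + 1 - 1 from Or.inr (by omega))]
  rw [List.map_congr_left (g := fun _ => y) (by
      intro c hc
      rw [List.mem_range] at hc
      simp only [Function.comp_apply]
      rw [if_neg]
      omega)]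
  simp [List.map_const']

-- '\n'.join(rows) + '\n' appends a separator to every row (rows nonempty)
lemma pvJoinNl (s : Char) (rows : List (List Char)) (h : rows ≠ []) :
    PySem.Chars.join [s] rows ++ [s] = (rows.map (fun r => r ++ [s])).flatten := by
  induction rows with
  | nil => exact absurd rfl h
  | cons r t ih =>
    cases t with
    | nil => simp [PySem.Chars.join_singleton]
    | cons r2 t2 =>
      rw [PySem.Chars.join_cons_cons, List.map_cons, List.flatten_cons, ← ih (by simp)]
      simp

lemma pvMain (lado : Int) : generar_figura lado = generar_figura_alt lado := by
  by_cases h1 : lado = 1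
  · subst h1; decide
  unfold generar_figura generar_figura_alt
  rw [pvFoldA]
  by_cases h0 : lado ≤ 0
  · rw [if_pos h0, PySem.List.pyRange_one_eq_nil (by omega)]
    rfl
  · rw [if_neg h0]
    simp only [if_neg h1]
    push Not at h0
    have h2 : 2 ≤ lado := by omega
    congr 1
    rw [pvJoinNl _ _ (by simp)]
    simp only [List.map_append, List.map_cons, List.map_nil, List.map_replicate,
      PySem.List.pyRepeat_singleton]
    rw [PySem.List.pyRange_one, List.flatMap_map, List.flatMap_def,
        show (lado + 1 - 1).toNat = lado.toNat from by omega]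
    congr 1
    rw [List.map_congr_left
      (g := fun k => if k = 0 ∨ k = lado.toNat - 1
        then PySem.List.pyRepeat ['*'] lado ++ ['\n']
        else (['*'] ++ PySem.List.pyRepeat [' '] (lado - 2) ++ ['*']) ++ ['\n']) (by
      intro k hk
      rw [List.mem_range] at hk
      unfold pvRowA
      simp only []
      by_cases hb : k = 0 ∨ k = lado.toNat - 1
      · rw [if_pos hb, if_pos (show 1 + (k : Int) = 1 ∨ 1 + (k : Int) = lado from by
          rcases hb with h | h
          · left; omega
          · right; omega)]
      · push Not at hb
        rw [if_neg (show ¬(1 + (k : Int) = 1 ∨ 1 + (k : Int) = lado) from by omega),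
            if_neg (show ¬(k = 0 ∨ k = lado.toNat - 1) from by omega)]
        simp)]
    rw [pvBorderMap lado.toNat (by omega)]
    simp [PySem.List.pyRepeat_singleton, show (lado - 2).toNat = lado.toNat - 2 from by omega]

-- ===== VERDICT (by name: the statement is the Claim_ definition above) =====
theorem generar_figura_spec : Claim_equal_generar_figura := by
  intro lado _
  unfold Spec_generar_figura
  exact pvMain lado
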